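-- pv_equiv track=rewrite | github.com/COYO-HM/CodingTestStudy | Becky/BOOSTCAMP/01/01_230613.py | solution
-- ===== SOURCE A (Python) =====
-- def solution(arr):
--     answer = []
--     dic = {}
--     arr.sort()
--
--     for a in arr:
--         if a in dic:
--             dic[a] += 1
--         else:
--             dic[a] = 1
--
--     for i, v in dic.items():
--         if v > 1:
--             answer.append(v)
--
--     if len(answer) == 0:
--         answer = [-1]
--     return answer
-- ===== SOURCE B (Python) =====
-- def solution(arr):
--     arr.sort()
--     answer = []
--     i, n = 0, len(arr)
--     while i < n:
--         j = i + 1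
--         while j < n and arr[j] == arr[i]:
--             j += 1
--         if j - i > 1:
--             answer.append(j - i)
--         i = j
--     return answer if answer else [-1]
-- ===== Notes on version B (the rewrite author's own statement) =====
-- stated objective: alternative
-- what changed: Replaces the hash-dict counting pass plus a second pass over dict items by a single two-pointer run-length scan of the sorted list, appending each run length > 1 directly; no dict is built.
import Mathlib
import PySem

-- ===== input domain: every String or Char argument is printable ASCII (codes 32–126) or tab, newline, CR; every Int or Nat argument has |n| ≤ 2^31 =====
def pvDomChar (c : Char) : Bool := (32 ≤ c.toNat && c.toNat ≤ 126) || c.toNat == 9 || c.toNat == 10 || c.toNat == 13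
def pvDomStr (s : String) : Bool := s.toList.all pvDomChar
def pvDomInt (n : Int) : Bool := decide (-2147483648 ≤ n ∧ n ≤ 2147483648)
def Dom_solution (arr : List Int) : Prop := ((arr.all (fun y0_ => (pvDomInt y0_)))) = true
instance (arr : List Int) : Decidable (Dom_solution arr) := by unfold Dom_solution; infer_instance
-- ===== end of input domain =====

-- B replaces the dict-counting pass plus dict-items pass by a single run-length scan of the sorted
-- list (alternative decomposition, same cost). Both A and B sort `arr` in place in Python; the
-- equivalence proved here is about the RETURN value.

-- ===== PORT A =====
def solution (arr : List Int) : List Int :=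
  let s := PySem.List.sorted arr (fun x => x) false
  let dic : PySem.Dict Int Int :=
    s.foldl (fun d a => if d.contains a then d.modify a 0 (· + 1) else d.insert a 1) PySem.Dict.empty
  let answer := dic.items.foldl (fun acc p => if p.2 > 1 then acc ++ [p.2] else acc) ([] : List Int)
  if answer.length = 0 then [-1] else answer

-- ===== PORT B =====
-- the two-pointer scan of Source B: the inner `while arr[j] == arr[i]` advance is the takeWhile prefix
-- (its length + 1 is j - i), the outer loop resumes at the dropWhile remainder
def runScan (s : List Int) : List Int :=
  match s with
  | [] => []
  | a :: t =>
    if ((t.takeWhile (fun x => x == a)).length : Int) + 1 > 1 then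
      (((t.takeWhile (fun x => x == a)).length : Int) + 1) :: runScan (t.dropWhile (fun x => x == a))
    else runScan (t.dropWhile (fun x => x == a))
termination_by s.length
decreasing_by
  all_goals
    simp only [List.length_cons]
    have := List.length_dropWhile_le (fun x => x == a) t
    omega

def solution_alt (arr : List Int) : List Int :=
  let s := PySem.List.sorted arr (fun x => x) false
  let answer := runScan s
  if answer = [] then [-1] else answer

-- ===== PRECONDITION & SPEC =====
def Spec_solution (arr : List Int) (out : List Int) : Prop := out = solution_alt arr
instance (arr : List Int) (out : List Int) : Decidable (Spec_solution arr out) := by unfold Spec_solution; infer_instance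

-- ===== CLAIM (what is proved, stated in full; the proofs are below) =====
def Claim_equal_solution : Prop := ∀ (arr : List Int), Dom_solution arr → Spec_solution arr (solution arr)

-- ===== LEMMAS AND PROOFS =====

-- A's counting loop is Counter(s): the two branches are both `d.modify a 0 (· + 1)`
lemma stepA_eq_counter_step (d : PySem.Dict Int Int) (a : Int) :
    (if d.contains a then d.modify a 0 (· + 1) else d.insert a 1) = d.modify a 0 (· + 1) := by
  by_cases h : d.contains a = true
  · simp [h]
  · have hg : d.getD a 0 = 0 :=
      PySem.Dict.getD_of_not_contains d 0 (by simpa using h)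
    simp [h, PySem.Dict.modify, hg]

lemma head_dropWhile_ne (a : Int) (t : List Int) (hp : t.Pairwise (· ≤ ·))
    (hle : ∀ y ∈ t, a ≤ y) : a ∉ t.dropWhile (fun x => x == a) := by
  induction t with
  | nil => simp
  | cons b t' ih =>
    by_cases hb : (b == a) = true
    · simp only [List.dropWhile_cons, hb, if_pos]
      exact ih hp.of_cons (fun y hy => hle y (List.mem_cons_of_mem _ hy))
    · simp only [List.dropWhile_cons, hb, Bool.false_eq_true, if_neg, not_false_eq_true]
      intro hmem
      rcases List.mem_cons.mp hmem with h | h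
      · exact hb (by simp [h])
      · have h1 : b ≤ a := (List.pairwise_cons.mp hp).1 a h
        have h2 : a ≤ b := hle b (List.mem_cons_self)
        exact hb (by simp [le_antisymm h1 h2])

lemma discard_of_not_mem (a : Int) (s : List Int) (h : ∀ x ∈ s, x ≠ a) :
    PySem.Set.discard s a = s := by
  simp only [PySem.Set.discard]
  apply List.filter_eq_self.mpr
  intro x hx
  simpa using h x hx

lemma discard_ofList_run (a : Int) (rest : List Int) (hrest : ∀ x ∈ rest, x ≠ a) :
    ∀ run : List Int, (∀ x ∈ run, x = a) →
      PySem.Set.discard (PySem.Set.ofList (run ++ rest)) a = PySem.Set.ofList rest := by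
  intro run
  induction run with
  | nil =>
    intro _
    rw [List.nil_append]
    exact discard_of_not_mem a _ (fun x hx => hrest x ((PySem.Set.mem_ofList _ _).mp hx))
  | cons b run' ih =>
    intro hall
    have hb : b = a := hall b (List.mem_cons_self)
    subst hb
    have hrun' : ∀ x ∈ run', x = b := fun x hx => hall x (List.mem_cons_of_mem _ hx)
    rw [List.cons_append, PySem.Set.ofList_cons, ih hrun']
    simp only [PySem.Set.discard, List.filter_cons]
    norm_num
    intro x hx he
    exact hrest x hx he

-- splitting a run: takeWhile/dropWhile of (run ++ rest) when all of run matches and rest's head does not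
lemma takeWhile_run (a : Int) (rest : List Int) (hrest : ∀ x ∈ rest, x ≠ a) :
    ∀ run : List Int, (∀ x ∈ run, x = a) →
      (run ++ rest).takeWhile (fun x => x == a) = run ∧
      (run ++ rest).dropWhile (fun x => x == a) = rest := by
  intro run
  induction run with
  | nil =>
    intro _
    rw [List.nil_append]
    cases rest with
    | nil => simp
    | cons c rest' =>
      have hc : (c == a) = false := by
        simpa using hrest c (List.mem_cons_self)
      simp [hc]
  | cons b run' ih =>
    intro hall
    have hb : b = a := hall b (List.mem_cons_self)
    have := ih (fun x hx => hall x (List.mem_cons_of_mem _ hx))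
    subst hb
    simp [this.1, this.2]

lemma cons_eq_ite_append (c : Prop) [Decidable c] (x : Int) (L : List Int) :
    (if c then x :: L else L) = (if c then [x] else []) ++ L := by
  split_ifs <;> simp

lemma map_filter_cons (f : Int → Int) (P : Int → Prop) [DecidablePred P] (a : Int) (l : List Int) :
    (List.filter (fun k => decide (P k)) (a :: l)).map f
      = (if P a then [f a] else []) ++ (List.filter (fun k => decide (P k)) l).map f := by
  rw [List.filter_cons]
  by_cases h : P a
  · simp [h]
  · simp [h]

lemma foldl_append_gt_one (l : List (Int × Int)) (acc : List Int) :
    l.foldl (fun acc p => if p.2 > 1 then acc ++ [p.2] else acc) acc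
      = acc ++ (l.filter (fun p => p.2 > 1)).map (·.2) := by
  induction l generalizing acc with
  | nil => simp
  | cons p l ih =>
    by_cases h : p.2 > 1 <;> simp [h, ih]

-- the key lemma: on a sorted list, the run-length scan produces exactly the >1 counts of the
-- distinct values in first-occurrence order — which is what A reads off its counting dict
lemma runScan_eq (n : ℕ) : ∀ s : List Int, s.length ≤ n → s.Pairwise (· ≤ ·) →
    runScan s =
      ((PySem.Set.ofList s).filter (fun k => 1 < ((s.count k : Nat) : Int))).map
        (fun k => ((s.count k : Nat) : Int)) := by
  induction n with
  | zero =>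
    intro s hlen _
    have : s = [] := List.length_eq_zero_iff.mp (Nat.le_zero.mp hlen)
    subst this
    simp [runScan]
  | succ n ih =>
    intro s hlen hs
    cases s with
    | nil => simp [runScan]
    | cons a t =>
      have hle : ∀ y ∈ t, a ≤ y := fun y hy => (List.pairwise_cons.mp hs).1 y hy
      obtain ⟨r, d, hrall, hdne, hdpw, ht⟩ :
          ∃ r d : List Int, (∀ x ∈ r, x = a) ∧ (∀ x ∈ d, x ≠ a) ∧
            d.Pairwise (· ≤ ·) ∧ t = r ++ d := by
        refine ⟨t.takeWhile (fun x => x == a), t.dropWhile (fun x => x == a),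
          fun x hx => by simpa using List.mem_takeWhile_imp hx, ?_, ?_, ?_⟩
        · intro x hx he
          exact head_dropWhile_ne a t hs.of_cons hle (he ▸ hx)
        · exact List.Pairwise.sublist (List.dropWhile_sublist _) hs.of_cons
        · exact List.takeWhile_append_dropWhile.symm
      subst ht
      obtain ⟨htw, hdw⟩ := takeWhile_run a d hdne r hrall
      -- counts over a :: (r ++ d)
      have hcount_a : (a :: (r ++ d)).count a = r.length + 1 := by
        simp only [List.count_cons, List.count_append]
        rw [List.count_eq_length.mpr (fun x hx => by simp [hrall x hx]),
            List.count_eq_zero.mpr (fun hmem => hdne a hmem rfl)]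
        simp
      have hcount_ne : ∀ k : Int, k ≠ a → (a :: (r ++ d)).count k = d.count k := by
        intro k hk
        simp only [List.count_cons, List.count_append]
        rw [List.count_eq_zero.mpr (fun hmem => hk (hrall k hmem))]
        simp [beq_eq_false_iff_ne.mpr (Ne.symm hk)]
      have hofList : PySem.Set.ofList (a :: (r ++ d)) = a :: PySem.Set.ofList d := by
        rw [PySem.Set.ofList_cons, discard_ofList_run a d hdne r hrall]
      have hdlen : d.length ≤ n := by
        simp only [List.length_cons, List.length_append] at hlen
        omega
      have hfix : ∀ k ∈ PySem.Set.ofList d, k ≠ a :=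
        fun k hk => hdne k ((PySem.Set.mem_ofList _ _).mp hk)
      rw [runScan, htw, hdw, cons_eq_ite_append, ih d hdlen hdpw, hofList,
          map_filter_cons]
      have hfilter :
          List.filter (fun k => decide (1 < (((a :: (r ++ d)).count k : Nat) : Int)))
              (PySem.Set.ofList d)
            = List.filter (fun k => decide (1 < ((d.count k : Nat) : Int)))
              (PySem.Set.ofList d) := by
        apply List.filter_congr
        intro k hk
        rw [hcount_ne k (hfix k hk)]
      have hmap :
          (List.filter (fun k => decide (1 < ((d.count k : Nat) : Int)))
              (PySem.Set.ofList d)).map (fun k => (((a :: (r ++ d)).count k : Nat) : Int))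
            = (List.filter (fun k => decide (1 < ((d.count k : Nat) : Int)))
              (PySem.Set.ofList d)).map (fun k => ((d.count k : Nat) : Int)) := by
        apply List.map_congr_left
        intro k hk
        rw [hcount_ne k (hfix k (List.mem_of_mem_filter hk))]
      rw [hfilter, hmap, hcount_a]
      congr 1

-- ===== VERDICT (by name: the statement is the Claim_ definition above) =====
theorem solution_spec : Claim_equal_solution := by
  intro arr _
  unfold Spec_solution
  show solution arr = solution_alt arr
  simp only [solution, solution_alt]
  have hs : (PySem.List.sorted arr (fun x => x) false).Pairwise (· ≤ ·) := by
    simpa using PySem.List.sorted_pairwise arr (fun x => x)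
  have hfold :
      (PySem.List.sorted arr (fun x => x) false).foldl
          (fun d a => if d.contains a then d.modify a 0 (· + 1) else d.insert a 1)
          PySem.Dict.empty
        = PySem.Dict.counter (PySem.List.sorted arr (fun x => x) false) := by
    rw [PySem.Dict.counter_eq_foldl]
    congr 1
    funext d a
    exact stepA_eq_counter_step d a
  rw [hfold, PySem.Dict.items_counter, foldl_append_gt_one, List.filter_map, List.map_map]
  simp only [Function.comp_def, List.nil_append, gt_iff_lt]
  rw [← runScan_eq (PySem.List.sorted arr (fun x => x) false).length _ le_rfl hs]
  rcases h : runScan (PySem.List.sorted arr (fun x => x) false) with _ | _ <;>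
    simp [List.length_eq_zero_iff]
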